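-- pv_equiv track=rewrite | github.com/naixsu/Advent-of-Code | 2024/day_1/part_2.py | build_hash
-- ===== SOURCE A (Python) =====
-- def build_hash(left: list[int], right: list[int]) -> dict:
--     sim_hash = {}
--
--     for num in right:
--         if num not in sim_hash:
--             sim_hash[num] = 0
--         if num in left:
--             sim_hash[num] += 1
--
--     return sim_hash
-- ===== SOURCE B (Python) =====
-- def build_hash(left: list[int], right: list[int]) -> dict:
--     left_set = set(left)
--     return {num: (right.count(num) if num in left_set else 0)
--             for num in dict.fromkeys(right)}
-- ===== Notes on version B (the rewrite author's own statement) =====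
-- stated objective: idiomatic
-- what changed: B keeps no running counter at all: it first deduplicates right into its distinct keys in first-appearance order (dict.fromkeys) and then computes each key's value once by counting its occurrences with right.count against a prebuilt set(left), instead of A's per-occurrence setdefault-and-increment loop that scans the left list on every iteration.
import Mathlib
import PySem

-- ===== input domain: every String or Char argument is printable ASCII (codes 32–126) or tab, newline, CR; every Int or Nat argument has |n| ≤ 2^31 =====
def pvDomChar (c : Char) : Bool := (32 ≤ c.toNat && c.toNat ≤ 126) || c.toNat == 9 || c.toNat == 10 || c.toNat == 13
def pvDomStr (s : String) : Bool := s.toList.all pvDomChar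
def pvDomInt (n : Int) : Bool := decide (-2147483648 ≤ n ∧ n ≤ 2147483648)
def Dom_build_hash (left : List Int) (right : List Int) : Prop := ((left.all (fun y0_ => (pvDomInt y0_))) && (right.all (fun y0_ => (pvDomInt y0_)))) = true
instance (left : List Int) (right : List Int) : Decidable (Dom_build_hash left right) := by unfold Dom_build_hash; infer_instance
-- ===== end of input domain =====

-- B keeps no running counter: it deduplicates right into its distinct keys (first-appearance
-- order) and computes each key's value once by counting its occurrences, instead of A's
-- per-occurrence setdefault-and-increment loop with a membership scan of left each iteration.

-- ===== PORT A =====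
-- one iteration of A's loop body: setdefault-style 0, then increment when num is in left
-- ('sim_hash[num] += 1' is ported as insert of getD+1; the key is always present at that point)
def bhStep (left : List Int) (sim_hash : PySem.Dict Int Int) (num : Int) : PySem.Dict Int Int :=
  let sim_hash := if sim_hash.contains num then sim_hash else sim_hash.insert num 0
  if left.contains num then sim_hash.insert num (sim_hash.getD num 0 + 1) else sim_hash

def build_hash (left : List Int) (right : List Int) : List (Int × Int) :=
  (right.foldl (bhStep left) PySem.Dict.empty).items

-- ===== PORT B =====
-- {num: (right.count(num) if num in left_set else 0) for num in dict.fromkeys(right)}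
def build_hash_alt (left : List Int) (right : List Int) : List (Int × Int) :=
  let left_set := PySem.Set.ofList left
  (PySem.List.dedup right).map
    (fun num => (num, if PySem.Set.contains left_set num then (right.count num : Int) else 0))

-- ===== PRECONDITION & SPEC =====
def Spec_build_hash (left : List Int) (right : List Int) (out : List (Int × Int)) : Prop := out = build_hash_alt left right
instance (left : List Int) (right : List Int) (out : List (Int × Int)) : Decidable (Spec_build_hash left right out) := by unfold Spec_build_hash; infer_instance

-- ===== CLAIM (what is proved, stated in full; the proofs are below) =====
def Claim_equal_build_hash : Prop := ∀ (left : List Int) (right : List Int), Dom_build_hash left right → Spec_build_hash left right (build_hash left right)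

-- ===== LEMMAS AND PROOFS =====

-- classification applied to one counter entry
def bhClassify (left : List Int) (p : Int × Int) : Int × Int :=
  (p.1, if left.contains p.1 then p.2 else 0)

-- lookup in a list mapped by the key-preserving classification
lemma get?_mk_map_classify (left : List Int) (l : List (Int × Int)) (k : Int) :
    (PySem.Dict.mk (l.map (bhClassify left))).get? k
      = ((PySem.Dict.mk l).get? k).map (fun v => if left.contains k then v else 0) := by
  induction l with
  | nil => simp [PySem.Dict.get?]
  | cons p rest ih =>
    rcases p with ⟨a, b⟩
    by_cases h : a = k
    · subst h
      simp [bhClassify, PySem.Dict.get?_mk_cons]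
    · simpa [bhClassify, PySem.Dict.get?_mk_cons, h] using ih

lemma get?_rel (left : List Int) (d c : PySem.Dict Int Int)
    (h : d.items = c.items.map (bhClassify left)) (k : Int) :
    d.get? k = (c.get? k).map (fun v => if left.contains k then v else 0) := by
  rcases d with ⟨dl⟩; rcases c with ⟨cl⟩
  have h' : dl = cl.map (bhClassify left) := h
  subst h'
  exact get?_mk_map_classify left cl k

lemma contains_rel (left : List Int) (d c : PySem.Dict Int Int)
    (h : d.items = c.items.map (bhClassify left)) (k : Int) :
    d.contains k = c.contains k := by
  rw [PySem.Dict.contains_eq_isSome_get?, PySem.Dict.contains_eq_isSome_get?, get?_rel left d c h k]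
  cases c.get? k <;> rfl

-- one step of A's loop vs one step of a plain counting loop, under the classification relation
lemma items_rel_step (left : List Int) (d c : PySem.Dict Int Int)
    (h : d.items = c.items.map (bhClassify left)) (num : Int) :
    (bhStep left d num).items
      = (c.insert num (c.getD num 0 + 1)).items.map (bhClassify left) := by
  have hcont := contains_rel left d c h num
  by_cases hc : c.contains num = true
  · -- num already a key of both dicts
    have hdc : d.contains num = true := by rw [hcont]; exact hc
    have hR : (c.insert num (c.getD num 0 + 1)).items
        = c.items.map (fun p => if (p.1 == num) = true then (num, c.getD num 0 + 1) else p) :=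
      PySem.Dict.items_insert_of_contains c _ hc
    by_cases hl : left.contains num = true
    · -- increment branch taken
      have hlm : num ∈ left := by simpa using hl
      have hgd : d.getD num 0 = c.getD num 0 := by
        rw [PySem.Dict.getD_eq_get?_getD, PySem.Dict.getD_eq_get?_getD, get?_rel left d c h num]
        cases c.get? num <;> simp [hlm]
      have hL : (bhStep left d num).items
          = d.items.map (fun p => if (p.1 == num) = true then (num, d.getD num 0 + 1) else p) := by
        simp only [bhStep, hdc, if_true, hl]
        exact PySem.Dict.items_insert_of_contains d _ hdc
      rw [hL, hR, h, List.map_map, List.map_map]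
      refine List.map_congr_left (fun p _ => ?_)
      rcases p with ⟨a, b⟩
      by_cases ha : a = num
      · subst ha; simp [bhClassify, hgd, hlm]
      · simp [bhClassify, ha]
    · -- num not in left: A leaves the dict unchanged
      have hlm : num ∉ left := by simpa using hl
      have hL : (bhStep left d num).items = d.items := by
        simp [bhStep, hdc, hlm]
      rw [hL, hR, h, List.map_map]
      refine List.map_congr_left (fun p _ => ?_)
      rcases p with ⟨a, b⟩
      by_cases ha : a = num
      · subst ha; simp [bhClassify, hlm]
      · simp [bhClassify, ha]
  · -- fresh key: appended by both
    have hc' : c.contains num = false := by cases hcc : c.contains num; rfl; exact absurd hcc hc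
    have hdc : d.contains num = false := by rw [hcont]; exact hc'
    have hkeys : ∀ p ∈ d.items, (p.1 == num) = false := by
      intro p hp
      rcases d with ⟨dl⟩
      have hx := hdc
      simp only [PySem.Dict.contains_mk, List.any_eq_false, Bool.not_eq_true] at hx
      exact hx p hp
    have hR : (c.insert num (c.getD num 0 + 1)).items = c.items ++ [(num, 1)] := by
      rw [PySem.Dict.items_insert_of_not_contains c _ hc', PySem.Dict.getD_of_not_contains c _ hc']
      norm_num
    have hins : (d.insert num 0).items = d.items ++ [(num, 0)] :=
      PySem.Dict.items_insert_of_not_contains d _ hdc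
    by_cases hl : left.contains num = true
    · have hlm : num ∈ left := by simpa using hl
      have hcont1 : (d.insert num 0).contains num = true := by
        rw [PySem.Dict.contains_eq_isSome_get?, PySem.Dict.get?_insert_self]; rfl
      have hgd1 : (d.insert num 0).getD num 0 = 0 := PySem.Dict.getD_insert_self d num 0 0
      have hL : (bhStep left d num).items
          = ((d.insert num 0).insert num ((0:Int) + 1)).items := by
        simp [bhStep, hdc, hlm, hgd1]
      rw [hL, PySem.Dict.items_insert_of_contains _ _ hcont1, hins, List.map_append]
      have hid : ∀ p ∈ d.items,
          (if (p.1 == num) = true then ((num:Int), (0:Int) + 1) else p) = p := by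
        intro p hp; rw [hkeys p hp]; simp
      rw [List.map_congr_left hid, List.map_id', hR, List.map_append, h]
      simp [bhClassify, hlm]
    · have hlm : num ∉ left := by simpa using hl
      have hL : (bhStep left d num).items = d.items ++ [(num, 0)] := by
        simp only [bhStep, hdc]
        simp [hlm, hins]
      rw [hL, hR, List.map_append, h]
      simp [bhClassify, hlm]

lemma items_rel_aux (left : List Int) (r : List Int) :
    ∀ (d c : PySem.Dict Int Int), d.items = c.items.map (bhClassify left) →
      (r.foldl (bhStep left) d).items
        = (r.foldl (fun d num => d.insert num (d.getD num 0 + 1)) c).items.map (bhClassify left) := by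
  induction r with
  | nil => intro d c h; simpa using h
  | cons num rest ih =>
    intro d c h
    simp only [List.foldl_cons]
    exact ih _ _ (items_rel_step left d c h num)

-- A's dict is Counter(right) with every key not in left classified to 0
lemma items_rel (left right : List Int) :
    (right.foldl (bhStep left) PySem.Dict.empty).items
      = (PySem.Dict.counter right).items.map (bhClassify left) := by
  rw [← PySem.Dict.foldl_insert_getD_add_one_eq_counter]
  exact items_rel_aux left right _ _ (by rfl)

-- ===== VERDICT (by name: the statement is the Claim_ definition above) =====
theorem build_hash_spec : Claim_equal_build_hash := by
  intro left right _
  unfold Spec_build_hash build_hash build_hash_alt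
  rw [items_rel, PySem.Dict.items_counter, List.map_map, PySem.List.dedup_eq_ofList]
  refine List.map_congr_left (fun k _ => ?_)
  simp [bhClassify, PySem.Set.contains, PySem.Set.mem_ofList]
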